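-- pv_equiv track=rewrite | github.com/byoutsey/motif-mark | motif_mark.py | generateMotifs
-- ===== SOURCE A (Python) =====
-- def generateMotifs(entryMotif):
--     '''Generates a list of all possible motifs given entry motif, recursively'''
--     possibleList = list()
--
--     if len(entryMotif) == 1:
--     #BASE CASE
--         if entryMotif == "y":
--             possibleList = ["t", "c"]
--
--         elif entryMotif == "u":
--             possibleList = ["t"]
--         else:
--             possibleList = [entryMotif]
--
--     else:
--         first = entryMotif[0:int(len(entryMotif)/2)]
--         firstList = generateMotifs(first)
--
--         second = entryMotif[int(len(entryMotif)/2):int(len(entryMotif)+1)]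
--         secondList = generateMotifs(second)
--
--         for firstCombo in firstList:
--             for secondCombo in secondList:
--                 possibleList.append(firstCombo + secondCombo)
--
--     return possibleList
-- ===== SOURCE B (Python) =====
-- def generateMotifs(entryMotif):
--     '''Generates a list of all possible motifs: left-to-right product fold'''
--     result = [""]
--     for ch in entryMotif:
--         if ch == "y":
--             options = ["t", "c"]
--         elif ch == "u":
--             options = ["t"]
--         else:
--             options = [ch]
--         result = [prefix + o for prefix in result for o in options]
--     return result
-- ===== Notes on version B (the rewrite author's own statement) =====
-- stated objective: simpler
-- what changed: Replaces A's balanced divide-and-conquer recursion (split motif in half, recurse on each half, cross-concatenate the two result lists) by a single left-to-right fold that crosses an accumulator of prefixes with each character's option list; Pre_ excludes only the empty string, on which A raises RecursionError.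
import Mathlib
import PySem

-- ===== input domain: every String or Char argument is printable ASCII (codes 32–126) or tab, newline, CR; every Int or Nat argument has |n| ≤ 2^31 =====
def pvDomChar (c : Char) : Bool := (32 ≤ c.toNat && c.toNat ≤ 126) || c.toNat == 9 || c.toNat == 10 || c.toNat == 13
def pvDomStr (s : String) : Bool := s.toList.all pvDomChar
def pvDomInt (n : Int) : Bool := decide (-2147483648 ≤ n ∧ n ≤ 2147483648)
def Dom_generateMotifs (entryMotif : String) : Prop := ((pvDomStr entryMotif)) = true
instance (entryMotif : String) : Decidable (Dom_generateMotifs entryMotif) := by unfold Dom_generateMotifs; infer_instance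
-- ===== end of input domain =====

-- B replaces A's balanced-split recursion by one flat left-to-right product fold (objective: simpler).
-- ===== PORT A =====
-- cartesian concatenation: the nested 'for firstCombo … for secondCombo … append' loop of A
def pvCross (xs ys : List (List Char)) : List (List Char) :=
  xs.flatMap (fun a => ys.map (fun b => a ++ b))

-- A's recursion, over the string's character list (slices s[0:k], s[k:] = take/drop on nonneg bounds).
-- The 'length = 0' branch is a totality guard only: Python A recurses forever there (excluded by Pre_).
def pvGenA (cs : List Char) : List (List Char) :=
  if cs.length = 1 then
    if cs = ['y'] then [['t'], ['c']]
    else if cs = ['u'] then [['t']]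
    else [cs]
  else if cs.length = 0 then []
  else
    pvCross (pvGenA (cs.take (cs.length / 2))) (pvGenA (cs.drop (cs.length / 2)))
termination_by cs.length
decreasing_by
  · simp only [List.length_take]; omega
  · simp only [List.length_drop]; omega

def generateMotifs (entryMotif : String) : List String :=
  (pvGenA entryMotif.toList).map (fun l => String.ofList l)

-- ===== PORT B =====
def pvOpts (c : Char) : List (List Char) :=
  if c = 'y' then [['t'], ['c']]
  else if c = 'u' then [['t']]
  else [[c]]

def generateMotifs_alt (entryMotif : String) : List String :=
  (entryMotif.toList.foldl
      (fun acc c => acc.flatMap (fun prefixL => (pvOpts c).map (fun o => prefixL ++ o)))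
      [[]]).map (fun l => String.ofList l)

-- ===== PRECONDITION & SPEC =====
-- Pre_ excludes only the empty string, on which Python A recurses forever (RecursionError).
def Pre_generateMotifs (entryMotif : String) : Prop := entryMotif ≠ ""
instance (entryMotif : String) : Decidable (Pre_generateMotifs entryMotif) := by unfold Pre_generateMotifs; infer_instance
def pvWitness_generateMotifs : String := "yau"

def Spec_generateMotifs (entryMotif : String) (out : List String) : Prop := out = generateMotifs_alt entryMotif
instance (entryMotif : String) (out : List String) : Decidable (Spec_generateMotifs entryMotif out) := by unfold Spec_generateMotifs; infer_instance

-- ===== CLAIM (what is proved, stated in full; the proofs are below) =====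
def Claim_equal_generateMotifs : Prop := ∀ (entryMotif : String), Dom_generateMotifs entryMotif → Pre_generateMotifs entryMotif → Spec_generateMotifs entryMotif (generateMotifs entryMotif)

-- ===== LEMMAS AND PROOFS =====
-- full product, rightwards: the common characterisation both ports are reduced to
def pvCrossAll (cs : List Char) : List (List Char) :=
  cs.foldr (fun c acc => pvCross (pvOpts c) acc) [[]]

theorem pvCross_nil_right (xs : List (List Char)) : pvCross xs [[]] = xs := by
  simp [pvCross]

theorem pvCross_nil_left (ys : List (List Char)) : pvCross [[]] ys = ys := by
  simp [pvCross]

theorem pvCross_assoc (xs ys zs : List (List Char)) :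
    pvCross (pvCross xs ys) zs = pvCross xs (pvCross ys zs) := by
  simp only [pvCross, List.flatMap_assoc, List.map_flatMap, List.flatMap_map, List.map_map,
    Function.comp_def, List.append_assoc]

theorem pvCrossAll_append (xs ys : List Char) :
    pvCrossAll (xs ++ ys) = pvCross (pvCrossAll xs) (pvCrossAll ys) := by
  induction xs with
  | nil => simp [pvCrossAll, pvCross_nil_left]
  | cons c cs ih => simp [pvCrossAll, List.foldr] at ih ⊢; rw [ih, pvCross_assoc]

theorem pvGenA_eq_crossAll : ∀ (cs : List Char), cs ≠ [] → pvGenA cs = pvCrossAll cs := by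
  intro cs
  induction hn : cs.length using Nat.strong_induction_on generalizing cs with
  | _ n ih =>
    intro hne
    rw [pvGenA]
    by_cases h1 : cs.length = 1
    · obtain ⟨c, rfl⟩ : ∃ c, cs = [c] := by
        match cs, h1 with
        | [c], _ => exact ⟨c, rfl⟩
      simp [pvCrossAll, pvCross_nil_right, pvOpts]
    · have h0 : cs.length ≠ 0 := by simpa using hne
      simp only [if_neg h1, if_neg h0]
      have hlen : 2 ≤ cs.length := by omega
      have hk1 : 1 ≤ cs.length / 2 := by omega
      have hk2 : cs.length / 2 < cs.length := by omega
      have htake : (cs.take (cs.length / 2)).length = cs.length / 2 := by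
        simp [List.length_take]; omega
      have hdrop : (cs.drop (cs.length / 2)).length = cs.length - cs.length / 2 := by
        simp [List.length_drop]
      rw [ih (cs.take (cs.length / 2)).length (by omega) _ rfl
          (by intro h; rw [h] at htake; simp at htake; omega),
        ih (cs.drop (cs.length / 2)).length (by omega) _ rfl
          (by intro h; rw [h] at hdrop; simp at hdrop; omega)]
      rw [← pvCrossAll_append, List.take_append_drop]

theorem pvFoldl_cross (cs : List Char) (A : List (List Char)) :
    cs.foldl (fun acc c => acc.flatMap (fun prefixL => (pvOpts c).map (fun o => prefixL ++ o))) A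
      = pvCross A (pvCrossAll cs) := by
  induction cs generalizing A with
  | nil => simp [pvCrossAll, pvCross_nil_right]
  | cons c cs ih => simp only [pvCrossAll, List.foldr, List.foldl] at ih ⊢; rw [ih, ← pvCross_assoc]; rfl

-- ===== VERDICT (by name: the statement is the Claim_ definition above) =====
theorem generateMotifs_spec : Claim_equal_generateMotifs := by
  intro s _ hpre
  unfold Spec_generateMotifs generateMotifs generateMotifs_alt
  have hne : s.toList ≠ [] := by
    intro h
    exact hpre (by simpa using congrArg String.ofList h)
  rw [pvGenA_eq_crossAll _ hne, pvFoldl_cross, pvCross_nil_left]
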